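-- pv_equiv track=rewrite | github.com/QraczQQ/Autodarts_raczqq | led_ir.py | preview_frame
-- ===== SOURCE A (Python) =====
-- LED_COUNT = 28
--
-- ACTIVE_COUNT_NON_SNAKE = 22  # ile diód ma być aktywnych dla WSZYSTKICH efektów poza snake
--
-- def mask_frame(frame, n):
--     """Wyzeruj piksele >= n."""
--     f = frame[:]  # kopia
--     for i in range(n, len(f)):
--         f[i] = (0, 0, 0)
--     return f
--
-- def frame_fill_even_odd(mode: str, rgb_even=(0,0,0), rgb_odd=(0,0,0)):
--     out = []
--     for i in range(LED_COUNT):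
--         if mode == 'even':
--             out.append(rgb_even if i % 2 == 0 else (0,0,0))
--         elif mode == 'odd':
--             out.append(rgb_odd if i % 2 == 1 else (0,0,0))
--         else:  # 'all'
--             out.append(rgb_even)
--     return out
--
-- def preview_frame(name: str):
--     """Podgląd klatki do cross-fade. Parzyste = RGB, nieparzyste = whites (WW=R, CW=B)."""
--     PREVIEWS = {
--         "red":  frame_fill_even_odd('even', (255,0,0)),
--         "green":frame_fill_even_odd('even', (0,255,0)),
--         "blue": frame_fill_even_odd('even', (0,0,255)),
--         "orange": frame_fill_even_odd('even', (255,70,0)),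
--         "lgr": frame_fill_even_odd('even', (0,75,255)),
--         "lbl": frame_fill_even_odd('even', (0,255,0)),
--         # whites na nieparzystych:
--         "ww":   frame_fill_even_odd('odd',  rgb_odd=(255,0,0)),     # WW = R
--         "cw":   frame_fill_even_odd('odd',  rgb_odd=(0,0,255)),     # CW = B
--         "ww_cw_odd":     frame_fill_even_odd('odd', rgb_odd=(255,0,255)), # WW+CW = R+B
--         "ww_cw_blue":    frame_fill_even_odd('odd', rgb_odd=(255,0,255)),
--         "alternate_white": frame_fill_even_odd('odd', rgb_odd=(255,0,255)),
--         # ALL MAX: parzyste pełna biel RGB, nieparzyste WW+CW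
--         "all_max": [(255,255,255) if (i % 2 == 0) else (255,0,255) for i in range(LED_COUNT)],
--         # snake może używać pełnych 28
--         "snake_combo": [(0,0,0)] * LED_COUNT,
--         "idle": [(0,0,0)] * LED_COUNT,
--     }
--     f = PREVIEWS.get(name, [(0,0,0)] * LED_COUNT)
--     # tylko snake ma mieć pełne 28; resztę maskujemy do 22
--     if name not in ("snake_combo", "snake"):
--         f = mask_frame(f, ACTIVE_COUNT_NON_SNAKE)
--     return f
-- ===== SOURCE B (Python) =====
-- LED_COUNT = 28
--
-- ACTIVE_COUNT_NON_SNAKE = 22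
--
-- # (even_rgb, odd_rgb) per preset; unknown names get all-black.
-- _PAIRS = {
--     "red":   ((255, 0, 0),   (0, 0, 0)),
--     "green": ((0, 255, 0),   (0, 0, 0)),
--     "blue":  ((0, 0, 255),   (0, 0, 0)),
--     "orange":((255, 70, 0),  (0, 0, 0)),
--     "lgr":   ((0, 75, 255),  (0, 0, 0)),
--     "lbl":   ((0, 255, 0),   (0, 0, 0)),
--     "ww":    ((0, 0, 0),     (255, 0, 0)),
--     "cw":    ((0, 0, 0),     (0, 0, 255)),
--     "ww_cw_odd":       ((0, 0, 0), (255, 0, 255)),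
--     "ww_cw_blue":      ((0, 0, 0), (255, 0, 255)),
--     "alternate_white": ((0, 0, 0), (255, 0, 255)),
--     "all_max":     ((255, 255, 255), (255, 0, 255)),
--     "snake_combo": ((0, 0, 0), (0, 0, 0)),
--     "idle":        ((0, 0, 0), (0, 0, 0)),
-- }
--
-- def preview_frame(name: str):
--     even, odd = _PAIRS.get(name, ((0, 0, 0), (0, 0, 0)))
--     limit = LED_COUNT if name in ("snake_combo", "snake") else ACTIVE_COUNT_NON_SNAKE
--     return [(even if i % 2 == 0 else odd) if i < limit else (0, 0, 0)
--             for i in range(LED_COUNT)]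
-- ===== Notes on version B (the rewrite author's own statement) =====
-- stated objective: simpler
-- what changed: Replaces A's per-call construction of all 14 full preview frames plus a separate masking pass by a static (even_rgb, odd_rgb) lookup table and a single parity+limit pass over the 28 LEDs that builds only the requested frame.
import Mathlib
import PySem

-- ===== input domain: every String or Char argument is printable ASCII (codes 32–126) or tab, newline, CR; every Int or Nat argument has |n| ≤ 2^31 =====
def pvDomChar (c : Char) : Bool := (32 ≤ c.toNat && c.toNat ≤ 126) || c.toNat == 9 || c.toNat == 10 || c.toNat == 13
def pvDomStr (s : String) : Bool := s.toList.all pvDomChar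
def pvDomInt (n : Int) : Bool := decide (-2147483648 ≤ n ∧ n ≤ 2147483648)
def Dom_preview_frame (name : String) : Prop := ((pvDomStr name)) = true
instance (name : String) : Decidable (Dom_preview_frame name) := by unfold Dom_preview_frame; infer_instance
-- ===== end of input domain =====

-- B replaces A's precomputation of all 14 preview frames plus a separate masking pass by a
-- static (even_rgb, odd_rgb) table and a single on-demand pass over the 28 LEDs (simpler).

-- ===== PORT A =====
-- mask_frame: f = frame[:]; for i in range(n, len(f)): f[i] = (0,0,0).
-- i runs over n ≤ i < len(f); in every call n = 22 ≥ 0 so i.toNat is exact.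
def mask_frame (frame : List (Int × Int × Int)) (n : Int) : List (Int × Int × Int) :=
  (PySem.List.pyRange n (frame.length : Int) 1).foldl
    (fun f i => f.set i.toNat (0, 0, 0)) frame

def frame_fill_even_odd (mode : String) (rgb_even rgb_odd : Int × Int × Int) :
    List (Int × Int × Int) :=
  (PySem.List.pyRange 0 28 1).foldl
    (fun out i =>
      if mode = "even" then
        out ++ [if PySem.Int.mod i 2 = 0 then rgb_even else (0, 0, 0)]
      else if mode = "odd" then
        out ++ [if PySem.Int.mod i 2 = 1 then rgb_odd else (0, 0, 0)]
      else
        out ++ [rgb_even]) []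

-- PREVIEWS: the dict literal A builds on each call (constant, lifted to a top-level helper)
def pvPreviews : PySem.Dict String (List (Int × Int × Int)) := PySem.Dict.ofList
    [ ("red",   frame_fill_even_odd "even" (255, 0, 0) (0, 0, 0))
    , ("green", frame_fill_even_odd "even" (0, 255, 0) (0, 0, 0))
    , ("blue",  frame_fill_even_odd "even" (0, 0, 255) (0, 0, 0))
    , ("orange", frame_fill_even_odd "even" (255, 70, 0) (0, 0, 0))
    , ("lgr",   frame_fill_even_odd "even" (0, 75, 255) (0, 0, 0))
    , ("lbl",   frame_fill_even_odd "even" (0, 255, 0) (0, 0, 0))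
    , ("ww",    frame_fill_even_odd "odd" (0, 0, 0) (255, 0, 0))
    , ("cw",    frame_fill_even_odd "odd" (0, 0, 0) (0, 0, 255))
    , ("ww_cw_odd",       frame_fill_even_odd "odd" (0, 0, 0) (255, 0, 255))
    , ("ww_cw_blue",      frame_fill_even_odd "odd" (0, 0, 0) (255, 0, 255))
    , ("alternate_white", frame_fill_even_odd "odd" (0, 0, 0) (255, 0, 255))
    , ("all_max", (PySem.List.pyRange 0 28 1).map
        (fun i => if PySem.Int.mod i 2 = 0 then ((255 : Int), (255 : Int), (255 : Int)) else (255, 0, 255)))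
    , ("snake_combo", List.replicate 28 ((0 : Int), (0 : Int), (0 : Int)))
    , ("idle",        List.replicate 28 ((0 : Int), (0 : Int), (0 : Int))) ]

def preview_frame (name : String) : List (Int × Int × Int) :=
  let f := pvPreviews.getD name (List.replicate 28 ((0 : Int), (0 : Int), (0 : Int)))
  if ¬ (name = "snake_combo" ∨ name = "snake") then mask_frame f 22 else f

-- ===== PORT B =====
def pvPairs : PySem.Dict String ((Int × Int × Int) × (Int × Int × Int)) := PySem.Dict.ofList
  [ ("red",   ((255, 0, 0),   (0, 0, 0)))
  , ("green", ((0, 255, 0),   (0, 0, 0)))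
  , ("blue",  ((0, 0, 255),   (0, 0, 0)))
  , ("orange", ((255, 70, 0), (0, 0, 0)))
  , ("lgr",   ((0, 75, 255),  (0, 0, 0)))
  , ("lbl",   ((0, 255, 0),   (0, 0, 0)))
  , ("ww",    ((0, 0, 0),     (255, 0, 0)))
  , ("cw",    ((0, 0, 0),     (0, 0, 255)))
  , ("ww_cw_odd",       ((0, 0, 0), (255, 0, 255)))
  , ("ww_cw_blue",      ((0, 0, 0), (255, 0, 255)))
  , ("alternate_white", ((0, 0, 0), (255, 0, 255)))
  , ("all_max",     ((255, 255, 255), (255, 0, 255)))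
  , ("snake_combo", ((0, 0, 0), (0, 0, 0)))
  , ("idle",        ((0, 0, 0), (0, 0, 0))) ]

def preview_frame_alt (name : String) : List (Int × Int × Int) :=
  let p := pvPairs.getD name ((0, 0, 0), (0, 0, 0))
  let limit : Int := if name = "snake_combo" ∨ name = "snake" then 28 else 22
  (PySem.List.pyRange 0 28 1).map
    (fun i => if i < limit then (if PySem.Int.mod i 2 = 0 then p.1 else p.2) else (0, 0, 0))

-- ===== PRECONDITION & SPEC =====
def Spec_preview_frame (name : String) (out : List (Int × Int × Int)) : Prop := out = preview_frame_alt name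
instance (name : String) (out : List (Int × Int × Int)) : Decidable (Spec_preview_frame name out) := by unfold Spec_preview_frame; infer_instance

-- ===== CLAIM (what is proved, stated in full; the proofs are below) =====
def Claim_equal_preview_frame : Prop := ∀ (name : String), Dom_preview_frame name → Spec_preview_frame name (preview_frame name)

-- ===== LEMMAS AND PROOFS =====

-- ===== VERDICT (by name: the statement is the Claim_ definition above) =====
theorem preview_frame_spec : Claim_equal_preview_frame := by
  intro name _
  unfold Spec_preview_frame
  by_cases h1 : name = "red"; · subst h1; decide
  by_cases h2 : name = "green"; · subst h2; decide
  by_cases h3 : name = "blue"; · subst h3; decide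
  by_cases h4 : name = "orange"; · subst h4; decide
  by_cases h5 : name = "lgr"; · subst h5; decide
  by_cases h6 : name = "lbl"; · subst h6; decide
  by_cases h7 : name = "ww"; · subst h7; decide
  by_cases h8 : name = "cw"; · subst h8; decide
  by_cases h9 : name = "ww_cw_odd"; · subst h9; decide
  by_cases h10 : name = "ww_cw_blue"; · subst h10; decide
  by_cases h11 : name = "alternate_white"; · subst h11; decide
  by_cases h12 : name = "all_max"; · subst h12; decide
  by_cases h13 : name = "snake_combo"; · subst h13; decide
  by_cases h14 : name = "idle"; · subst h14; decide
  by_cases h15 : name = "snake"; · subst h15; decide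
  have hA : pvPreviews.get? name = none := by
    rw [PySem.Dict.get?_eq_none_iff_not_mem_keys]
    have hk : pvPreviews.keys = ["red", "green", "blue", "orange", "lgr", "lbl", "ww",
        "cw", "ww_cw_odd", "ww_cw_blue", "alternate_white", "all_max", "snake_combo", "idle"] := by
      decide
    rw [hk]
    simp [h1, h2, h3, h4, h5, h6, h7, h8, h9, h10, h11, h12, h13, h14]
  have hB : pvPairs.get? name = none := by
    rw [PySem.Dict.get?_eq_none_iff_not_mem_keys]
    have hk : pvPairs.keys = ["red", "green", "blue", "orange", "lgr", "lbl", "ww",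
        "cw", "ww_cw_odd", "ww_cw_blue", "alternate_white", "all_max", "snake_combo", "idle"] := by
      decide
    rw [hk]
    simp [h1, h2, h3, h4, h5, h6, h7, h8, h9, h10, h11, h12, h13, h14]
  simp only [preview_frame, preview_frame_alt, PySem.Dict.getD_eq_get?_getD, hA, hB,
    Option.getD, h13, h15, or_self, not_false_iff, if_pos]
  decide
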